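-- pv_equiv track=rewrite | github.com/songzy12/CodeForces | Round/1001-2000/1001-1100/1018/A.py | compute
-- ===== SOURCE A (Python) =====
-- def compute(n, s):
--     l = 1
--     r = n
--     ans = []
--     for c in s[::-1]:
--         if c == '>':
--             ans= [r] + ans
--             r -=1
--         else:
--             ans = [l] + ans
--             l += 1
--     ans = [l] + ans
--     return " ".join(map(str, ans))
-- ===== SOURCE B (Python) =====
-- def compute(n, s):
--     G = s.count('>')
--     L = len(s) - G          # chars A treats as '<' (any non-'>' char)
--     out = [L + 1]
--     hi = n - G + 1
--     lo = L
--     for c in s: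
--         if c == '>':
--             out.append(hi)
--             hi += 1
--         else:
--             out.append(lo)
--             lo -= 1
--     return " ".join(map(str, out))
-- ===== Notes on version B (the rewrite author's own statement) =====
-- stated objective: faster
-- what changed: Replaces A's reversed-iteration with O(n) list prepends ([x] + ans per step) by a count-then-forward scan: B derives the seeds from the '>' count (first element L+1, hi = n-G+1 rising per '>', lo = L falling otherwise) and appends in one left-to-right pass.
import Mathlib
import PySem

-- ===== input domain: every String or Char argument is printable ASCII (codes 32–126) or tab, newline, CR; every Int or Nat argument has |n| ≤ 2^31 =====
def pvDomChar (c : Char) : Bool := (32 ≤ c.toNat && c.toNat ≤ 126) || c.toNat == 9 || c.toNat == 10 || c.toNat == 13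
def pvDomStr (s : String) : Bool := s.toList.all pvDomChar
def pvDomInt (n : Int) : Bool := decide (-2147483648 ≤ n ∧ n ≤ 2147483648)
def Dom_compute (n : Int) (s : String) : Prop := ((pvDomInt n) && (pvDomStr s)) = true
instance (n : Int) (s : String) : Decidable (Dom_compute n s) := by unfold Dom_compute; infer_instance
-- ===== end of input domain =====

-- B replaces A's reversed iteration with list prepends by a count-then-forward append scan
-- whose start values are derived from the '>' count (objective: faster — appends instead of quadratic prepends).

-- ===== PORT A =====
-- the for-loop over s[::-1] with state (l, r, ans); A prepends to ans
def computeLoop : List Char → Int → Int → List Int → Int × Int × List Int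
  | [], l, r, ans => (l, r, ans)
  | c :: cs, l, r, ans =>
    if c = '>' then computeLoop cs l (r - 1) (r :: ans)
    else computeLoop cs (l + 1) r (l :: ans)

def compute (n : Int) (s : String) : String :=
  -- s[::-1] is the reverse of the character list (PySem.Str.slice?_none_none_neg_one)
  PySem.Str.join " "
    (((computeLoop s.toList.reverse 1 n []).1 :: (computeLoop s.toList.reverse 1 n []).2.2).map
      PySem.Int.toStr)

-- ===== PORT B =====
-- the forward for-loop with state (hi, lo, out); B appends to out
def computeAltLoop : List Char → Int → Int → List Int → List Int
  | [], _, _, out => out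
  | c :: cs, hi, lo, out =>
    if c = '>' then computeAltLoop cs (hi + 1) lo (out ++ [hi])
    else computeAltLoop cs hi (lo - 1) (out ++ [lo])

def compute_alt (n : Int) (s : String) : String :=
  -- s.count('>') with a single-character needle is exactly List.count on the code points;
  -- G and L from Source B are written out inline
  PySem.Str.join " "
    ((computeAltLoop s.toList (n - ((s.toList.count '>' : Int)) + 1)
        ((s.toList.length : Int) - (s.toList.count '>' : Int))
        [(s.toList.length : Int) - (s.toList.count '>' : Int) + 1]).map PySem.Int.toStr)

-- ===== PRECONDITION & SPEC =====
def Spec_compute (n : Int) (s : String) (out : String) : Prop := out = compute_alt n s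
instance (n : Int) (s : String) (out : String) : Decidable (Spec_compute n s out) := by unfold Spec_compute; infer_instance

-- ===== CLAIM (what is proved, stated in full; the proofs are below) =====
def Claim_equal_compute : Prop := ∀ (n : Int) (s : String), Dom_compute n s → Spec_compute n s (compute n s)

-- ===== LEMMAS AND PROOFS =====

-- forward characterisation of A's reversed-prepend loop body (the ans list it builds)
def bodyA : List Char → Int → Int → List Int
  | [], _, _ => []
  | c :: cs, l, r =>
    if c = '>' then (r - (cs.count '>' : Int)) :: bodyA cs l r
    else (l + ((cs.length : Int) - (cs.count '>' : Int))) :: bodyA cs l r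

-- the values B's forward loop appends
def bodyB : List Char → Int → Int → List Int
  | [], _, _ => []
  | c :: cs, hi, lo =>
    if c = '>' then hi :: bodyB cs (hi + 1) lo else lo :: bodyB cs hi (lo - 1)

theorem computeLoop_append (xs ys : List Char) (l r : Int) (ans : List Int) :
    computeLoop (xs ++ ys) l r ans =
      computeLoop ys (computeLoop xs l r ans).1 (computeLoop xs l r ans).2.1 (computeLoop xs l r ans).2.2 := by
  induction xs generalizing l r ans with
  | nil => simp [computeLoop]
  | cons c cs ih =>
    by_cases h : c = '>' <;> simp [computeLoop, h, ih]

theorem computeLoop_reverse (cs : List Char) (l r : Int) (ans : List Int) :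
    computeLoop cs.reverse l r ans =
      (l + ((cs.length : Int) - (cs.count '>' : Int)), r - (cs.count '>' : Int), bodyA cs l r ++ ans) := by
  induction cs generalizing ans with
  | nil => simp [computeLoop, bodyA]
  | cons c cs ih =>
    rw [List.reverse_cons, computeLoop_append, ih]
    by_cases h : c = '>' <;>
      simp [computeLoop, bodyA, h] <;> ring_nf

theorem computeAltLoop_eq (cs : List Char) (hi lo : Int) (out : List Int) :
    computeAltLoop cs hi lo out = out ++ bodyB cs hi lo := by
  induction cs generalizing hi lo out with
  | nil => simp [computeAltLoop, bodyB]
  | cons c cs ih =>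
    by_cases h : c = '>' <;> simp [computeAltLoop, bodyB, h, ih]

theorem bodyA_eq_bodyB (cs : List Char) (l r : Int) :
    bodyA cs l r = bodyB cs (r - (cs.count '>' : Int) + 1) (l + ((cs.length : Int) - (cs.count '>' : Int)) - 1) := by
  induction cs generalizing l r with
  | nil => simp [bodyA, bodyB]
  | cons c cs ih =>
    by_cases h : c = '>' <;>
      simp [bodyA, bodyB, h, ih] <;> ring_nf <;> simp

-- ===== VERDICT (by name: the statement is the Claim_ definition above) =====
theorem compute_spec : Claim_equal_compute := by
  intro n s _
  unfold Spec_compute compute compute_alt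
  rw [computeLoop_reverse, computeAltLoop_eq, bodyA_eq_bodyB]
  simp
  ring_nf
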